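-- pv_equiv track=rewrite | github.com/lvoegtlin/bullinger_clearance_dotts | src/dot_search.py | check_dots_inline
-- ===== SOURCE A (Python) =====
-- from typing import List, Tuple
--
-- def check_dots_inline(lines: List[Tuple[str, str, str]]) -> List[Tuple[str, str, str]]:
--     # search for points and look if afterwards is captial if not write into name and gt into list
--     not_captial_after_dot = []
--     exceptions = ['"', '.']
--     for path_gt in lines:
--         line = path_gt[2]
--         line = line.strip()
--         try:
--             idx = line.index('.')
--         except ValueError:
--             continue
--         if idx + 1 == len(line):
--             continue
--         next_letter = ""
--         i = 1
--
--         while line[idx + i] == ' ':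
--             i = i + 1
--         else:
--             next_letter = line[idx + i]
--
--         if next_letter.isupper() or next_letter in exceptions or next_letter.isnumeric():
--             continue
--         not_captial_after_dot.append(path_gt)
--
--     return not_captial_after_dot
-- ===== SOURCE B (Python) =====
-- from typing import List, Tuple
--
-- def check_dots_inline(lines: List[Tuple[str, str, str]]) -> List[Tuple[str, str, str]]:
--     # Single backward pass per stripped line: fold over reversed(line) keeping
--     # nxt = first non-space char of the suffix seen so far, res = verdict for that
--     # suffix; every '.' overwrites res, so the final res belongs to the leftmost dot.
--     def keep(raw: str) -> bool:
--         nxt = None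
--         res = False
--         for c in reversed(raw.strip()):
--             if c == '.':
--                 res = nxt is not None and not (
--                     nxt.isupper() or nxt in ('"', '.') or nxt.isnumeric())
--             if c != ' ':
--                 nxt = c
--         return res
--     return [pg for pg in lines if keep(pg[2])]
-- ===== Notes on version B (the rewrite author's own statement) =====
-- stated objective: alternative
-- what changed: B drops A's find-the-first-dot-then-skip-spaces scan entirely: it classifies each stripped line in one backward fold over the reversed string, carrying the first non-space character of the suffix seen so far and a running verdict that each dot overwrites, so the final verdict belongs to the leftmost dot.
import Mathlib
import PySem

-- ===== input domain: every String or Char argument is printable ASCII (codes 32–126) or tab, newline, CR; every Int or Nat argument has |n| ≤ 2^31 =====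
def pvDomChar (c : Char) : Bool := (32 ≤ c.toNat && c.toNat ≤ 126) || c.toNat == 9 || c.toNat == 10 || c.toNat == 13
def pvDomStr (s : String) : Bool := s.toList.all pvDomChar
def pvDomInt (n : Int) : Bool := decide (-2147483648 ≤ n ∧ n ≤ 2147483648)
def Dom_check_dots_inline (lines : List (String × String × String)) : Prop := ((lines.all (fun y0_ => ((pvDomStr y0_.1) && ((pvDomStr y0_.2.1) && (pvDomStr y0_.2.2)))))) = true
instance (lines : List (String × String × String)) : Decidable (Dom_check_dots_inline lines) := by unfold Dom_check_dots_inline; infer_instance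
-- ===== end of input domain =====

-- B replaces A's find-the-dot-then-skip-spaces scan by ONE backward fold over the reversed
-- stripped line (registers: first non-space char of the suffix, verdict of the suffix);
-- objective: alternative, same cost.

-- ===== PORT A =====
-- the Python while-loop "i = 1; while line[idx+i] == ' ': i += 1; else: next_letter = line[idx+i]",
-- scanning line[j] for j = idx+1, idx+2, …; line[j] with j ≥ 0 is getElem? (none = IndexError —
-- unreachable because line is stripped, so Python never actually raises here)
def pvScanA (line : List Char) (j : Nat) : Option Char :=
  match h : getElem? line j with
  | none => none
  | some c => if c = ' ' then pvScanA line (j + 1) else some c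
termination_by line.length - j
decreasing_by
  have : j < line.length := (List.getElem?_eq_some_iff.mp h).1
  omega

def check_dots_inline (lines : List (String × String × String)) : List (String × String × String) :=
  lines.foldl (fun not_captial_after_dot path_gt =>
    let line := PySem.Chars.strip path_gt.2.2.toList
    match PySem.List.index? line '.' with
    | none => not_captial_after_dot                        -- except ValueError: continue
    | some idx =>
      if idx + 1 = line.length then not_captial_after_dot  -- continue
      else
        match pvScanA line (idx + 1) with
        | none => not_captial_after_dot                    -- IndexError branch; unreachable on a stripped line
        | some next_letter =>
          -- next_letter.isupper() or next_letter in ['"', '.'] or next_letter.isnumeric()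
          -- (isnumeric = isdigit on the printable-ASCII Dom)
          if PySem.Chars.isupper next_letter || next_letter ∈ ['"', '.'] || PySem.Chars.isdigit next_letter then
            not_captial_after_dot                          -- continue
          else
            not_captial_after_dot ++ [path_gt]) []

-- ===== PORT B =====
-- one step of the backward loop "for c in reversed(raw.strip())": state = (nxt, res)
def pvStepB (c : Char) (st : Option Char × Bool) : Option Char × Bool :=
  let res :=
    if c = '.' then
      match st.1 with
      | none => false
      | some n => !(PySem.Chars.isupper n || n == '"' || n == '.' || PySem.Chars.isdigit n)
    else st.2
  ((if c = ' ' then st.1 else some c), res)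

-- Python iterates reversed(line) front-of-loop = rightmost char first: List.foldr is exact
def pvKeepB (raw : String) : Bool :=
  ((PySem.Chars.strip raw.toList).foldr pvStepB (none, false)).2

def check_dots_inline_alt (lines : List (String × String × String)) : List (String × String × String) :=
  lines.filter (fun pg => pvKeepB pg.2.2)

-- ===== PRECONDITION & SPEC =====
def Spec_check_dots_inline (lines : List (String × String × String)) (out : List (String × String × String)) : Prop := out = check_dots_inline_alt lines
instance (lines : List (String × String × String)) (out : List (String × String × String)) : Decidable (Spec_check_dots_inline lines out) := by unfold Spec_check_dots_inline; infer_instance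

-- ===== CLAIM (what is proved, stated in full; the proofs are below) =====
def Claim_equal_check_dots_inline : Prop := ∀ (lines : List (String × String × String)), Dom_check_dots_inline lines → Spec_check_dots_inline lines (check_dots_inline lines)

-- ===== LEMMAS AND PROOFS =====

-- the first-dot / next-letter characterisation both loops are proved against
def pvSpecB (line : List Char) : Bool :=
  match (List.span (fun x => x != '.') line).2 with
  | [] => false
  | _ :: tail =>
    match List.dropWhile (fun x => x == ' ') tail with
    | [] => false
    | c :: _ => !(PySem.Chars.isupper c || c == '"' || c == '.' || PySem.Chars.isdigit c)

-- invariant of B's backward fold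
theorem pvFoldB_eq (line : List Char) :
    line.foldr pvStepB (none, false)
      = ((line.dropWhile (· == ' ')).head?, pvSpecB line) := by
  induction line with
  | nil => simp [pvSpecB]
  | cons c s ih =>
    simp only [List.foldr_cons, ih, pvStepB, pvSpecB, List.span_eq_takeWhile_dropWhile,
      List.dropWhile_cons]
    by_cases hdot : c = '.'
    · subst hdot
      have : ¬ (('.' : Char) = ' ') := by decide
      simp [this]
      cases hrest : s.dropWhile (· == ' ') with
      | nil => simp
      | cons n r => simp
    · have hne : (c != '.') = true := by simpa using hdot
      by_cases hsp : c = ' '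
      · subst hsp
        simp
      · have hs : (c == ' ') = false := by simpa using hsp
        simp [hdot, hs, hsp]

theorem pvKeepB_eq (raw : String) :
    pvKeepB raw = pvSpecB (PySem.Chars.strip raw.toList) := by
  simp [pvKeepB, pvFoldB_eq]

-- pvScanA is the head of the space-stripped suffix
theorem pvScanA_eq (line : List Char) (j : Nat) :
    pvScanA line j = ((line.drop j).dropWhile (· == ' ')).head? := by
  fun_induction pvScanA line j with
  | case1 j h =>
    have hle : line.length ≤ j := by simpa using h
    simp [List.drop_eq_nil_of_le hle]
  | case2 j h ih =>
    have hj : j < line.length := (List.getElem?_eq_some_iff.mp h).1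
    have hd : line.drop j = ' ' :: line.drop (j + 1) := by
      rw [List.drop_eq_getElem_cons hj]
      simp [List.getElem?_eq_some_iff.mp h |>.2]
    rw [hd, List.dropWhile_cons]
    simpa using ih
  | case3 j c h hc =>
    have hj : j < line.length := (List.getElem?_eq_some_iff.mp h).1
    have hd : line.drop j = c :: line.drop (j + 1) := by
      rw [List.drop_eq_getElem_cons hj]
      simp [List.getElem?_eq_some_iff.mp h |>.2]
    rw [hd, List.dropWhile_cons]
    simp [hc]

-- A's loop body returns acc ++ [pg] exactly when the characterisation holds of the line
theorem body_eq_aux (acc : List (String × String × String)) (pg : String × String × String)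
    (line : List Char) :
    (match PySem.List.index? line '.' with
     | none => acc
     | some idx =>
       if idx + 1 = line.length then acc
       else
         match pvScanA line (idx + 1) with
         | none => acc
         | some next_letter =>
           if PySem.Chars.isupper next_letter || next_letter ∈ ['"', '.'] || PySem.Chars.isdigit next_letter then
             acc
           else
             acc ++ [pg])
    = if pvSpecB line then acc ++ [pg] else acc := by
  simp only [pvSpecB, List.span_eq_takeWhile_dropWhile]
  cases hidx : PySem.List.index? line '.' with
  | none =>
    have hnot : '.' ∉ line := (PySem.List.index?_eq_none_iff line '.').mp hidx
    have hdw : line.dropWhile (· != '.') = [] := by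
      rw [List.dropWhile_eq_nil_iff]
      intro x hx
      simp only [bne_iff_ne, ne_eq]
      rintro rfl; exact hnot hx
    simp [hdw]
  | some idx =>
    obtain ⟨pre, suf, hsplit, hlen, hpre⟩ := (PySem.List.index?_eq_some_iff line '.' idx).mp hidx
    have hdwpre : List.dropWhile (· != '.') pre = [] := by
      rw [List.dropWhile_eq_nil_iff]
      intro x hx
      simp only [bne_iff_ne, ne_eq]
      rintro rfl; exact hpre hx
    have hdw : line.dropWhile (· != '.') = '.' :: suf := by
      rw [hsplit, List.dropWhile_append, hdwpre]
      simp
    have hlength : line.length = idx + 1 + suf.length := by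
      rw [hsplit]; simp [← hlen]; omega
    have hdrop : line.drop (idx + 1) = suf := by
      have h1 : idx + 1 = pre.length + 1 := by omega
      rw [hsplit, h1, ← List.drop_drop, List.drop_left]
      simp
    simp only [hdw]
    by_cases hsuf : suf = []
    · subst hsuf
      have h2 : idx + 1 = line.length := by simp [hlength]
      simp [h2]
    · have hne : ¬ (idx + 1 = line.length) := by
        have : suf.length ≠ 0 := by simpa using hsuf
        omega
      rw [if_neg hne, pvScanA_eq, hdrop]
      cases hrest : suf.dropWhile (· == ' ') with
      | nil => simp
      | cons c rest =>
        simp only [List.head?_cons]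
        split_ifs with hA hB hB <;> try rfl
        · exfalso
          simp only [Bool.or_eq_true, decide_eq_true_eq, List.mem_cons,
            List.not_mem_nil, or_false, Bool.not_eq_eq_eq_not, Bool.not_true, Bool.or_eq_false_iff,
            beq_eq_false_iff_ne, ne_eq] at hA hB
          simp_all
        · exfalso
          simp only [Bool.or_eq_true, decide_eq_true_eq, List.mem_cons,
            List.not_mem_nil, or_false, Bool.not_eq_eq_eq_not, Bool.not_true, Bool.or_eq_false_iff,
            beq_eq_false_iff_ne, ne_eq, not_or] at hA hB
          simp_all

theorem body_eq (acc : List (String × String × String)) (pg : String × String × String) :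
    (match PySem.List.index? (PySem.Chars.strip pg.2.2.toList) '.' with
     | none => acc
     | some idx =>
       if idx + 1 = (PySem.Chars.strip pg.2.2.toList).length then acc
       else
         match pvScanA (PySem.Chars.strip pg.2.2.toList) (idx + 1) with
         | none => acc
         | some next_letter =>
           if PySem.Chars.isupper next_letter || next_letter ∈ ['"', '.'] || PySem.Chars.isdigit next_letter then
             acc
           else
             acc ++ [pg]) = if pvKeepB pg.2.2 then acc ++ [pg] else acc := by
  rw [pvKeepB_eq]
  exact body_eq_aux acc pg _

theorem loop_eq (lines : List (String × String × String)) (acc : List (String × String × String)) :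
    lines.foldl (fun not_captial_after_dot path_gt =>
      let line := PySem.Chars.strip path_gt.2.2.toList
      match PySem.List.index? line '.' with
      | none => not_captial_after_dot
      | some idx =>
        if idx + 1 = line.length then not_captial_after_dot
        else
          match pvScanA line (idx + 1) with
          | none => not_captial_after_dot
          | some next_letter =>
            if PySem.Chars.isupper next_letter || next_letter ∈ ['"', '.'] || PySem.Chars.isdigit next_letter then
              not_captial_after_dot
            else
              not_captial_after_dot ++ [path_gt]) acc
    = acc ++ lines.filter (fun pg => pvKeepB pg.2.2) := by
  induction lines generalizing acc with
  | nil => simp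
  | cons pg rest ih =>
    rw [List.foldl_cons, List.filter_cons, ih]
    simp only []
    rw [body_eq acc pg]
    by_cases hk : pvKeepB pg.2.2 <;> simp [hk]

-- ===== VERDICT (by name: the statement is the Claim_ definition above) =====
theorem check_dots_inline_spec : Claim_equal_check_dots_inline := by
  intro lines _hdom
  unfold Spec_check_dots_inline check_dots_inline check_dots_inline_alt
  rw [loop_eq]
  simp
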